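-- pv_equiv track=rewrite | github.com/oguzhanctk/scrawl | Hackerrank/algorithm.py | acmTeam
-- ===== SOURCE A (Python) =====
-- def acmTeam(topics):
--     topic_length = len(topics[0])
--     max_counter = 0
--     num_of_way = 0
--     counter_list = []
--
--     for _i in range(len(topics) - 1):
--         counter = 0
--         for _j in range(_i + 1, len(topics)):
--             or_str = int(topics[_i], 2) | int(topics[_j], 2)
--             c = bin(or_str)[2:].count("1")
--             if c >= max_counter:
--                 max_counter = c
--                 counter_list.append(c)
--
--     for way in counter_list:
--         if way == max_counter:
--             num_of_way += 1
--
--     return [max_counter, num_of_way]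
-- ===== SOURCE B (Python) =====
-- def _tally(best, ways, c, w):
--     if c > best:
--         return c, w
--     if c == best:
--         return best, ways + w
--     return best, ways
--
--
-- def acmTeam(topics):
--     if len(topics) < 2:
--         return [0, 0]
--     freq = {}
--     for t in topics:
--         v = int(t, 2)
--         freq[v] = freq.get(v, 0) + 1
--     masks = list(freq)
--     best = 0
--     ways = 0
--     for i in range(len(masks)):
--         a = masks[i]
--         fa = freq[a]
--         if fa >= 2:
--             best, ways = _tally(best, ways, bin(a)[2:].count("1"), fa * (fa - 1) // 2)
--         for j in range(i + 1, len(masks)):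
--             b = masks[j]
--             best, ways = _tally(best, ways, bin(a | b)[2:].count("1"), fa * freq[b])
--     return [best, ways]
-- ===== Notes on version B (the rewrite author's own statement) =====
-- stated objective: alternative
-- what changed: B returns [0,0] when there are fewer than two rows (no pairs); otherwise it aggregates the rows into a first-occurrence frequency dictionary of distinct bitmasks and scans only distinct-mask pairs, weighting each candidate popcount by freq[a]*freq[b] (and C(f,2) for duplicate rows), instead of A's enumeration of all index pairs with per-pair re-parsing, a materialized list of running maxima and a second counting pass; this is correct because a|b and its popcount depend only on the mask values, so every index pair contributes through its value pair's multiplicity.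
import Mathlib
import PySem

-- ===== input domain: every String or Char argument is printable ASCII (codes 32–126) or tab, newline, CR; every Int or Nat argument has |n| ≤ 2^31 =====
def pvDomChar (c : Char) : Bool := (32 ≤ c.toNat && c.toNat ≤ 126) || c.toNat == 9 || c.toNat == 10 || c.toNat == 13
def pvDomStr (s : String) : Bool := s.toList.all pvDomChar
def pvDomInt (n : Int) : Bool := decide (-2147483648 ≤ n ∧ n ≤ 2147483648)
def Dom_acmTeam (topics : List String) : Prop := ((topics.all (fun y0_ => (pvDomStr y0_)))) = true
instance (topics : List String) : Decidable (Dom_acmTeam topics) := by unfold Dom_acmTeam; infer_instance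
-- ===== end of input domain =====

-- B groups the rows into a frequency table of distinct bitmasks and scans distinct-mask pairs with
-- multiplicity weights, instead of A's scan of all index pairs with a candidate list and a second pass.

-- shared primitives (exact models of the Python built-ins both programs call):
-- int(s, 2); none = ValueError (excluded by Pre_); .getD 0 is never the value returned on Pre_
def pvParse (s : String) : Int := (PySem.Int.ofStrBase? s 2).getD 0
-- bin(x)[2:].count("1"), exactly: pyBin chars, slice [2:], substring count of "1"
def pvBits (x : Int) : Nat :=
  PySem.Chars.count (PySem.Chars.slice (PySem.Int.toBinChars0b x) (some 2) none) ['1']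

-- ===== PORT A =====
-- topic_length = len(topics[0]) raises IndexError on []; Pre_ excludes []; its value is unused.
-- the Python's `counter = 0` is dead (never read or returned) and is not carried in the state.
def acmTeam (topics : List String) : List Int :=
  let n : Int := (topics.length : Int)
  let st :=
    (PySem.List.pyRange 0 (n - 1)).foldl
      (fun (st : Int × List Int) i =>
        (PySem.List.pyRange (i + 1) n).foldl
          (fun st j =>
            let orStr : Int :=
              PySem.Int.bor (pvParse (PySem.List.pyGetD topics i ""))
                            (pvParse (PySem.List.pyGetD topics j ""))
            let c : Int := (pvBits orStr : Int)
            if st.1 ≤ c then (c, st.2 ++ [c]) else st)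
          st)
      ((0 : Int), ([] : List Int))
  let numOfWay : Int := st.2.foldl (fun k way => if way = st.1 then k + 1 else k) 0
  [st.1, numOfWay]

-- ===== PORT B =====
-- _tally(best, ways, c, w)
def pvTally (best ways c w : Int) : Int × Int :=
  if best < c then (c, w) else if c = best then (best, ways + w) else (best, ways)

def acmTeam_alt (topics : List String) : List Int :=
  if (topics.length : Int) < 2 then [0, 0] else
  let freq : PySem.Dict Int Int :=
    topics.foldl (fun d t =>
      let v := pvParse t
      d.insert v (d.getD v 0 + 1)) PySem.Dict.empty
  let masks : List Int := freq.keys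
  let m : Int := (masks.length : Int)
  let st :=
    (PySem.List.pyRange 0 m).foldl
      (fun (st : Int × Int) i =>
        let a := PySem.List.pyGetD masks i 0
        let fa := freq.getD a 0
        let st1 :=
          if 2 ≤ fa then
            pvTally st.1 st.2 ((pvBits a : Int)) (PySem.Int.floordiv (fa * (fa - 1)) 2)
          else st
        (PySem.List.pyRange (i + 1) m).foldl
          (fun st j =>
            let b := PySem.List.pyGetD masks j 0
            pvTally st.1 st.2 ((pvBits (PySem.Int.bor a b) : Int)) (fa * freq.getD b 0))
          st1)
      ((0 : Int), (0 : Int))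
  [st.1, st.2]

-- ===== PRECONDITION & SPEC =====
-- Pre_ excludes exactly the inputs where A raises: the empty list (IndexError on topics[0]) and
-- lists of two or more strings containing one that int(t, 2) rejects (ValueError in the pair loop).
def Pre_acmTeam (topics : List String) : Prop :=
  topics ≠ [] ∧ ((topics.length : Int) < 2 ∨ ∀ t ∈ topics, (PySem.Int.ofStrBase? t 2).isSome)
instance (topics : List String) : Decidable (Pre_acmTeam topics) := by
  unfold Pre_acmTeam; infer_instance

def pvWitness_acmTeam : List String := ["101", "110", "011"]

def Spec_acmTeam (topics : List String) (out : List Int) : Prop := out = acmTeam_alt topics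
instance (topics : List String) (out : List Int) : Decidable (Spec_acmTeam topics out) := by
  unfold Spec_acmTeam; infer_instance

-- ===== CLAIM (what is proved, stated in full; the proofs are below) =====
def Claim_equal_acmTeam : Prop :=
  ∀ (topics : List String), Dom_acmTeam topics → Pre_acmTeam topics →
    Spec_acmTeam topics (acmTeam topics)
-- ===== LEMMAS AND PROOFS =====

-- the popcount of the OR of two masks: the single function of the VALUE pair through which
-- every index pair of A and every weighted mask pair of B contributes
def pvF (a b : Int) : Int := (pvBits (PySem.Int.bor a b) : Int)

theorem pv_bor_self (a : Int) : PySem.Int.bor a a = a := by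
  simp only [PySem.Int.bor, Nat.or_self, Nat.and_self]
  split_ifs with h <;> omega

theorem pvF_comm (a b : Int) : pvF a b = pvF b a := by
  simp [pvF, PySem.Int.bor_comm]

theorem pvF_self (a : Int) : pvF a a = (pvBits a : Int) := by
  simp [pvF, pv_bor_self]

-- A's per-pair update and the weighted tally step, as step functions
def pvStepA (st : Int × List Int) (c : Int) : Int × List Int :=
  if st.1 ≤ c then (c, st.2 ++ [c]) else st
def pvStepB (st : Int × Int) (c : Int) : Int × Int :=
  if st.1 < c then (c, 1) else if c = st.1 then (st.1, st.2 + 1) else st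
def pvWStep (st : Int × Int) (p : Int × Int) : Int × Int := pvTally st.1 st.2 p.1 p.2

theorem pvStepB_eq_wstep (st : Int × Int) (c : Int) : pvStepB st c = pvWStep st (c, 1) := by
  simp [pvStepB, pvWStep, pvTally]

-- the pair values of A, in iteration order (index formulation)
def pvC (topics : List String) (i j : Int) : Int :=
  (pvBits (PySem.Int.bor (pvParse (PySem.List.pyGetD topics i ""))
                         (pvParse (PySem.List.pyGetD topics j ""))) : Int)
def pvCs (topics : List String) (outerStop : Int) : List Int :=
  (PySem.List.pyRange 0 outerStop).flatMap
    (fun i => (PySem.List.pyRange (i + 1) (topics.length : Int)).map (pvC topics i))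

-- fold of a nested loop = fold over the flattened value list
theorem pv_foldl_nested {σ γ : Type} (step : σ → γ → σ) (inner : Int → List γ)
    (outer : List Int) (init : σ) :
    outer.foldl (fun s i => (inner i).foldl step s) init
      = (outer.flatMap inner).foldl step init := by
  induction outer generalizing init with
  | nil => rfl
  | cons x xs ih => simp [List.foldl_append, ih]

-- A's outer range(n-1) and the full range(n) flatten to the same value list: the extra
-- outer index n-1 has an empty inner range
theorem pv_cs_ext (topics : List String) (h : topics ≠ []) :
    pvCs topics ((topics.length : Int) - 1) = pvCs topics (topics.length : Int) := by
  have hn : (1 : Int) ≤ (topics.length : Int) := by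
    have := List.length_pos_iff.mpr h; exact_mod_cast this
  unfold pvCs
  have hsplit : PySem.List.pyRange 0 (topics.length : Int)
      = PySem.List.pyRange 0 ((topics.length : Int) - 1) ++ [(topics.length : Int) - 1] := by
    have := PySem.List.pyRange_one_succ_right
      (a := 0) (b := (topics.length : Int) - 1) (by omega)
    simpa using this
  rw [hsplit, List.flatMap_append]
  have hempty : PySem.List.pyRange ((topics.length : Int) - 1 + 1) (topics.length : Int) = [] := by
    have : (topics.length : Int) - 1 + 1 = (topics.length : Int) := by omega
    rw [this]
    simp [PySem.List.pyRange]
  simp only [hempty, List.map_nil, List.flatMap_cons, List.flatMap_nil, List.append_nil]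

-- the core invariant linking A's (max, list) state and the (best, count) of the same values:
-- same max, count = multiplicity of the max in the list, and every list entry ≤ max
theorem pv_fold_link (cs : List Int) :
    ∀ (m : Int) (l : List Int) (k : Int),
      ((l.count m : Int) = k) → (∀ e ∈ l, e ≤ m) →
      (cs.foldl pvStepA (m, l)).1 = (cs.foldl pvStepB (m, k)).1 ∧
      (((cs.foldl pvStepA (m, l)).2.count (cs.foldl pvStepA (m, l)).1 : Int)
          = (cs.foldl pvStepB (m, k)).2) ∧
      (∀ e ∈ (cs.foldl pvStepA (m, l)).2, e ≤ (cs.foldl pvStepA (m, l)).1) := by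
  induction cs with
  | nil => intro m l k hk hle; exact ⟨rfl, hk, hle⟩
  | cons c cs ih =>
    intro m l k hk hle
    by_cases h1 : m < c
    · have hA : pvStepA (m, l) c = (c, l ++ [c]) := by
        simp [pvStepA, le_of_lt h1]
      have hB : pvStepB (m, k) c = (c, 1) := by simp [pvStepB, h1]
      rw [List.foldl_cons, List.foldl_cons, hA, hB]
      apply ih
      · have hnot : c ∉ l := fun hc => absurd (hle c hc) (by omega)
        simp [List.count_append, List.count_eq_zero.mpr hnot]
      · intro e he
        rcases List.mem_append.mp he with h | h
        · exact le_of_lt (lt_of_le_of_lt (hle e h) h1)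
        · simp_all
    · by_cases h2 : c = m
      · subst h2
        have hA : pvStepA (c, l) c = (c, l ++ [c]) := by simp [pvStepA]
        have hB : pvStepB (c, k) c = (c, k + 1) := by simp [pvStepB]
        rw [List.foldl_cons, List.foldl_cons, hA, hB]
        apply ih
        · simp [List.count_append]; omega
        · intro e he
          rcases List.mem_append.mp he with h | h
          · exact hle e h
          · simp_all
      · have hA : pvStepA (m, l) c = (m, l) := by
          simp only [pvStepA]
          have : ¬ (m ≤ c) := by
            intro hmc
            exact h2 (le_antisymm (by omega) hmc)
          simp [this]
        have hB : pvStepB (m, k) c = (m, k) := by simp [pvStepB, h1, h2]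
        rw [List.foldl_cons, List.foldl_cons, hA, hB]
        exact ih m l k hk hle

-- A's final num_of_way loop is the Int-valued count of the final maximum in counter_list
theorem pv_count_loop (m : Int) (l : List Int) :
    l.foldl (fun k way => if way = m then k + 1 else k) (0 : Int) = (l.count m : Int) := by
  have := PySem.List.foldl_count_if (fun way => decide (way = m)) l 0
  simpa [List.count] using this

-- A's port, rewritten as the flat fold of pvStepA plus the count of the final maximum
theorem pv_acmTeam_eq (topics : List String) :
    acmTeam topics
      = [((pvCs topics ((topics.length : Int) - 1)).foldl pvStepA (0, [])).1,
         (((pvCs topics ((topics.length : Int) - 1)).foldl pvStepA (0, [])).2.count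
            ((pvCs topics ((topics.length : Int) - 1)).foldl pvStepA (0, [])).1 : Int)] := by
  unfold acmTeam pvCs
  rw [← pv_foldl_nested pvStepA]
  have hinner : ∀ (i : Int) (st : Int × List Int),
      (PySem.List.pyRange (i + 1) (topics.length : Int)).foldl
        (fun st j =>
          let orStr : Int :=
            PySem.Int.bor (pvParse (PySem.List.pyGetD topics i ""))
                          (pvParse (PySem.List.pyGetD topics j ""))
          let c : Int := (pvBits orStr : Int)
          if st.1 ≤ c then (c, st.2 ++ [c]) else st) st
      = ((PySem.List.pyRange (i + 1) (topics.length : Int)).map (pvC topics i)).foldl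
          pvStepA st := by
    intro i st
    rw [List.foldl_map]
    rfl
  simp only [hinner]
  rw [pv_count_loop]

-- ========== generic structural pair machinery ==========

-- all (ordered i < j) pairs of a list, each contributing g xᵢ xⱼ, preceded per element by gd xᵢ
def pvPairsWith {α β : Type} (gd : α → List β) (g : α → α → β) : List α → List β
  | [] => []
  | a :: ms => gd a ++ ms.map (g a) ++ pvPairsWith gd g ms

theorem pv_shift_range (a b : Int) :
    PySem.List.pyRange (a + 1) (b + 1) = (PySem.List.pyRange a b).map (· + 1) := by
  rw [PySem.List.pyRange_one, PySem.List.pyRange_one]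
  have h : (b + 1 - (a + 1)) = b - a := by ring
  rw [h, List.map_map]
  apply List.map_congr_left
  intro k _
  simp
  ring

theorem pv_pyGetD_zero {α : Type} (x : α) (xs : List α) (d : α) :
    PySem.List.pyGetD (x :: xs) 0 d = x := by
  have h0 := PySem.List.pyGetD_natCast (x :: xs) 0 d
  simp only [Nat.cast_zero, List.getD_cons_zero] at h0
  exact h0

theorem pv_pyGetD_cons_succ {α : Type} (x : α) (xs : List α) (i : Int) (h : 0 ≤ i) (d : α) :
    PySem.List.pyGetD (x :: xs) (i + 1) d = PySem.List.pyGetD xs i d := by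
  obtain ⟨k, rfl⟩ := Int.eq_ofNat_of_zero_le h
  have h1 : (k : Int) + 1 = ((k + 1 : Nat) : Int) := by push_cast; ring
  rw [h1, PySem.List.pyGetD_natCast, PySem.List.pyGetD_natCast]
  simp

theorem pv_flatMap_congr {α β : Type} (l : List α) (f g : α → List β)
    (h : ∀ a ∈ l, f a = g a) : l.flatMap f = l.flatMap g := by
  induction l with
  | nil => rfl
  | cons x xs ih =>
    simp only [List.flatMap_cons]
    rw [h x (by simp), ih (fun a ha => h a (by simp [ha]))]

-- the index-pair double loop, flattened, is the structural pair list
theorem pv_idx_pairs {α β : Type} (xs : List α) (d : α) (gd : α → List β) (g : α → α → β) :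
    (PySem.List.pyRange 0 (xs.length : Int)).flatMap
      (fun i => gd (PySem.List.pyGetD xs i d)
          ++ (PySem.List.pyRange (i + 1) (xs.length : Int)).map
              (fun j => g (PySem.List.pyGetD xs i d) (PySem.List.pyGetD xs j d)))
      = pvPairsWith gd g xs := by
  induction xs with
  | nil =>
    rw [show ((List.nil : List α).length : Int) = 0 by simp]
    rw [PySem.List.pyRange_one_eq_nil (le_refl 0)]
    rfl
  | cons x xs ih =>
    have hlen : (((x :: xs).length : Int)) = (xs.length : Int) + 1 := by
      push_cast [List.length_cons]; ring
    rw [hlen, PySem.List.pyRange_one_cons (by omega : (0 : Int) < (xs.length : Int) + 1),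
        List.flatMap_cons]
    show _ ++ _ = (gd x ++ xs.map (g x)) ++ pvPairsWith gd g xs
    congr 1
    · -- the i = 0 block: x against every later element
      rw [pv_pyGetD_zero]
      congr 1
      rw [pv_shift_range 0 (xs.length : Int), List.map_map]
      rw [List.map_congr_left (g := fun j => g x (PySem.List.pyGetD xs j d))
          (fun j hj => by
            have h0 : 0 ≤ j := (PySem.List.mem_pyRange_one.mp hj).1
            show g x (PySem.List.pyGetD (x :: xs) (j + 1) d) = g x (PySem.List.pyGetD xs j d)
            rw [pv_pyGetD_cons_succ _ _ _ h0])]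
      have hmap := PySem.List.map_pyGetD_pyRange_zero' (xs := xs) (d := d)
      calc (PySem.List.pyRange 0 (xs.length : Int)).map (fun j => g x (PySem.List.pyGetD xs j d))
          = ((PySem.List.pyRange 0 (xs.length : Int)).map
              (fun j => PySem.List.pyGetD xs j d)).map (g x) := by rw [List.map_map]; rfl
        _ = xs.map (g x) := by rw [hmap]
    · -- the remaining outer indices, shifted down by one
      rw [pv_shift_range 0 (xs.length : Int), List.flatMap_map]
      rw [pv_flatMap_congr _ _
          (fun i => gd (PySem.List.pyGetD xs i d)
            ++ (PySem.List.pyRange (i + 1) (xs.length : Int)).map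
                (fun j => g (PySem.List.pyGetD xs i d) (PySem.List.pyGetD xs j d)))
          (fun i hi => by
            have h0 : 0 ≤ i := (PySem.List.mem_pyRange_one.mp hi).1
            show gd (PySem.List.pyGetD (x :: xs) (i + 1) d) ++ _ = _
            rw [pv_pyGetD_cons_succ _ _ _ h0]
            congr 1
            rw [pv_shift_range (i + 1) (xs.length : Int), List.map_map]
            apply List.map_congr_left
            intro j hj
            have hj0 : 0 ≤ j := by
              have := (PySem.List.mem_pyRange_one.mp hj).1; omega
            show g (PySem.List.pyGetD xs i d) (PySem.List.pyGetD (x :: xs) (j + 1) d)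
                = g (PySem.List.pyGetD xs i d) (PySem.List.pyGetD xs j d)
            rw [pv_pyGetD_cons_succ _ _ _ hj0])]
      exact ih

theorem pv_pairsWith_comp {α β : Type} (f : α → Int) (gd : Int → List β) (g : Int → Int → β)
    (xs : List α) :
    pvPairsWith (fun a => gd (f a)) (fun a b => g (f a) (f b)) xs
      = pvPairsWith gd g (xs.map f) := by
  induction xs with
  | nil => rfl
  | cons x xs ih => simp [pvPairsWith, ih, List.map_map]

-- ========== weighted tally characterization ==========

def pvMaxv (m : Int) (l : List (Int × Int)) : Int := l.foldl (fun acc p => max acc p.1) m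
def pvWsum (l : List (Int × Int)) (t : Int) : Int :=
  (l.map (fun p => if p.1 = t then p.2 else 0)).sum

theorem pvWsum_nil (t : Int) : pvWsum [] t = 0 := rfl
theorem pvWsum_cons (p : Int × Int) (l : List (Int × Int)) (t : Int) :
    pvWsum (p :: l) t = (if p.1 = t then p.2 else 0) + pvWsum l t := by
  simp [pvWsum]
theorem pvWsum_append (l₁ l₂ : List (Int × Int)) (t : Int) :
    pvWsum (l₁ ++ l₂) t = pvWsum l₁ t + pvWsum l₂ t := by
  simp [pvWsum]

theorem pv_le_maxv (l : List (Int × Int)) : ∀ m : Int, m ≤ pvMaxv m l := by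
  induction l with
  | nil => intro m; simp [pvMaxv]
  | cons p l ih =>
    intro m
    have := ih (max m p.1)
    simp only [pvMaxv, List.foldl_cons] at *
    exact le_trans (le_max_left m p.1) this

theorem pv_maxv_ge (l : List (Int × Int)) : ∀ (m : Int), ∀ p ∈ l, p.1 ≤ pvMaxv m l := by
  induction l with
  | nil => intro m p hp; simp at hp
  | cons q l ih =>
    intro m p hp
    rcases List.mem_cons.mp hp with h | h
    · subst h
      have := pv_le_maxv l (max m p.1)
      simp only [pvMaxv, List.foldl_cons] at *
      exact le_trans (le_max_right m p.1) this
    · exact ih (max m q.1) p h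

theorem pv_maxv_mem (l : List (Int × Int)) :
    ∀ m : Int, pvMaxv m l = m ∨ pvMaxv m l ∈ l.map Prod.fst := by
  induction l with
  | nil => intro m; left; rfl
  | cons p l ih =>
    intro m
    rcases ih (max m p.1) with h | h
    · simp only [pvMaxv, List.foldl_cons] at *
      rcases max_cases m p.1 with ⟨he, _⟩ | ⟨he, _⟩
      · left; rw [h, he]
      · right; rw [h, he]; simp
    · right
      simp only [pvMaxv, List.foldl_cons] at *
      simp [h]

theorem pv_tally_char (l : List (Int × Int)) :
    ∀ (m k : Int),
      l.foldl pvWStep (m, k)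
        = (pvMaxv m l,
           if pvMaxv m l = m then k + pvWsum l m else pvWsum l (pvMaxv m l)) := by
  induction l with
  | nil => intro m k; simp [pvMaxv, pvWsum]
  | cons p l ih =>
    intro m k
    obtain ⟨c, w⟩ := p
    have hstep : pvWStep (m, k) (c, w)
        = if m < c then (c, w) else if c = m then (m, k + w) else (m, k) := rfl
    have hmaxv : pvMaxv m ((c, w) :: l) = pvMaxv (max m c) l := rfl
    rw [List.foldl_cons, hstep, hmaxv]
    rcases lt_trichotomy m c with h1 | h1 | h1
    · rw [if_pos h1, ih c w, max_eq_right (le_of_lt h1)]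
      have hM : c ≤ pvMaxv c l := pv_le_maxv l c
      rw [if_neg (by omega : ¬ pvMaxv c l = m)]
      by_cases h2 : pvMaxv c l = c
      · rw [if_pos h2, pvWsum_cons, h2, if_pos rfl]
      · rw [if_neg h2, pvWsum_cons, if_neg (fun hc => h2 hc.symm), zero_add]
    · rw [if_neg (by omega : ¬ m < c), if_pos h1.symm, ih m (k + w),
          max_eq_left (le_of_eq h1.symm)]
      by_cases h2 : pvMaxv m l = m
      · rw [if_pos h2, if_pos h2, pvWsum_cons, if_pos h1.symm]
        rw [Prod.mk.injEq]
        exact ⟨rfl, by ring⟩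
      · have hM : m ≤ pvMaxv m l := pv_le_maxv l m
        rw [if_neg h2, if_neg h2, pvWsum_cons,
            if_neg (by omega : ¬ c = pvMaxv m l), zero_add]
    · rw [if_neg (by omega : ¬ m < c), if_neg (by omega : ¬ c = m), ih m k,
          max_eq_left (le_of_lt h1)]
      by_cases h2 : pvMaxv m l = m
      · rw [if_pos h2, if_pos h2, pvWsum_cons, if_neg (by omega : ¬ c = m), zero_add]
      · have hM : m ≤ pvMaxv m l := pv_le_maxv l m
        rw [if_neg h2, if_neg h2, pvWsum_cons,
            if_neg (by omega : ¬ c = pvMaxv m l), zero_add]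

theorem pv_tally_char0 (l : List (Int × Int)) :
    l.foldl pvWStep (0, 0) = (pvMaxv 0 l, pvWsum l (pvMaxv 0 l)) := by
  rw [pv_tally_char]
  by_cases h : pvMaxv 0 l = 0 <;> simp [h]

theorem pv_wsum_map_one (cs : List Int) (t : Int) :
    pvWsum (cs.map (fun c => (c, (1 : Int)))) t = (cs.count t : Int) := by
  induction cs with
  | nil => simp [pvWsum]
  | cons c cs ih =>
    by_cases h : c = t
    · simp [pvWsum_cons, ih, h]
      omega
    · simp [pvWsum_cons, ih, h]

-- ========== the two programs' pair lists ==========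

def pvFreq (nums : List Int) (v : Int) : Int := (nums.count v : Int)
def pvGd (F : Int → Int) (a : Int) : List (Int × Int) :=
  if 2 ≤ F a then [((pvBits a : Int), PySem.Int.floordiv (F a * (F a - 1)) 2)] else []
def pvGp (F : Int → Int) (a b : Int) : Int × Int := (pvF a b, F a * F b)
def pvW (F : Int → Int) (ms : List Int) : List (Int × Int) := pvPairsWith (pvGd F) (pvGp F) ms
def pvPV (nums : List Int) : List Int := pvPairsWith (fun _ => ([] : List Int)) pvF nums

theorem pv_W_congr (F F' : Int → Int) (ms : List Int) (h : ∀ a ∈ ms, F a = F' a) :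
    pvW F ms = pvW F' ms := by
  induction ms with
  | nil => rfl
  | cons a ms ih =>
    have ha : F a = F' a := h a (by simp)
    show pvGd F a ++ ms.map (pvGp F a) ++ pvW F ms
        = pvGd F' a ++ ms.map (pvGp F' a) ++ pvW F' ms
    rw [ih (fun b hb => h b (by simp [hb]))]
    congr 1
    congr 1
    · simp [pvGd, ha]
    · apply List.map_congr_left
      intro b hb
      simp [pvGp, ha, h b (by simp [hb])]

-- pvWsum over a mapped row is the row's indicator-weighted sum
theorem pv_wsum_map (ms : List Int) (v w : Int → Int) (t : Int) :
    pvWsum (ms.map (fun b => (v b, w b))) t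
      = (ms.map (fun b => if v b = t then w b else 0)).sum := by
  induction ms with
  | nil => rfl
  | cons b ms ih => simp only [List.map_cons, pvWsum_cons, ih, List.sum_cons]

theorem pv_W_cons (F : Int → Int) (a : Int) (ms : List Int) (t : Int) :
    pvWsum (pvW F (a :: ms)) t
      = (if 2 ≤ F a ∧ (pvBits a : Int) = t then PySem.Int.floordiv (F a * (F a - 1)) 2 else 0)
        + (ms.map (fun b => if pvF a b = t then F a * F b else 0)).sum
        + pvWsum (pvW F ms) t := by
  show pvWsum (pvGd F a ++ ms.map (pvGp F a) ++ pvW F ms) t = _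
  rw [pvWsum_append, pvWsum_append]
  congr 1
  congr 1
  · by_cases h : 2 ≤ F a
    · rw [pvGd, if_pos h, pvWsum_cons, pvWsum_nil, add_zero]
      by_cases hb : (pvBits a : Int) = t
      · rw [if_pos hb, if_pos ⟨h, hb⟩]
      · rw [if_neg hb, if_neg (fun hc => hb hc.2)]
    · rw [pvGd, if_neg h, pvWsum_nil, if_neg (fun hc => h hc.1)]
  · exact pv_wsum_map ms (fun b => pvF a b) (fun b => F a * F b) t

-- ========== combinatorial core ==========

theorem pv_sum_congr_except (ms : List Int) (x : Int) (f f' : Int → Int)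
    (hnd : ms.Nodup) (hx : x ∈ ms) (h : ∀ b ∈ ms, b ≠ x → f' b = f b) :
    (ms.map f').sum = (ms.map f).sum + (f' x - f x) := by
  induction ms with
  | nil => simp at hx
  | cons a ms ih =>
    rw [List.nodup_cons] at hnd
    rcases List.mem_cons.mp hx with h1 | h1
    · subst h1
      have hms : ms.map f' = ms.map f := by
        apply List.map_congr_left
        intro b hb
        exact h b (by simp [hb]) (fun hbx => hnd.1 (hbx ▸ hb))
      simp only [List.map_cons, List.sum_cons, hms]
      ring
    · have ha : f' a = f a := h a (by simp) (fun hax => hnd.1 (hax ▸ h1))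
      simp only [List.map_cons, List.sum_cons, ha,
        ih hnd.2 h1 (fun b hb hbx => h b (by simp [hb]) hbx)]
      ring

theorem pv_dedup_snoc_mem (xs : List Int) (x : Int) (hx : x ∈ xs) :
    PySem.List.dedup (xs ++ [x]) = PySem.List.dedup xs := by
  simp only [PySem.List.dedup_eq_ofList]
  rw [PySem.Set.ofList_append_singleton, PySem.Set.add_of_mem ((PySem.Set.mem_ofList xs x).mpr hx)]

theorem pv_dedup_snoc_new (xs : List Int) (x : Int) (hx : x ∉ xs) :
    PySem.List.dedup (xs ++ [x]) = PySem.List.dedup xs ++ [x] := by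
  simp only [PySem.List.dedup_eq_ofList]
  rw [PySem.Set.ofList_append_singleton,
      PySem.Set.add_of_not_mem (fun hm => hx ((PySem.Set.mem_ofList xs x).mp hm))]

theorem pv_count_snoc (xs : List Int) (x b : Int) :
    (xs ++ [x]).count b = xs.count b + if x = b then 1 else 0 := by
  rw [List.count_append, List.count_singleton]
  by_cases h : x = b
  · subst h
    simp
  · simp [h]

-- Σ over the distinct masks of count·indicator = countP over the raw list
theorem pv_masks_sum (xs : List Int) (p : Int → Bool) :
    ((PySem.List.dedup xs).map (fun a => if p a then (xs.count a : Int) else 0)).sum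
      = (xs.countP p : Int) := by
  induction xs using List.reverseRecOn with
  | nil => rfl
  | append_singleton xs x ih =>
    have hcp : ((xs ++ [x]).countP p : Int)
        = (xs.countP p : Int) + (if p x then 1 else 0) := by
      rw [List.countP_append]
      by_cases h : p x
      · simp [h]
      · simp [h]
    by_cases hx : x ∈ xs
    · rw [pv_dedup_snoc_mem xs x hx]
      rw [pv_sum_congr_except (PySem.List.dedup xs) x
        (fun a => if p a then (xs.count a : Int) else 0)
        (fun a => if p a then ((xs ++ [x]).count a : Int) else 0)
        (PySem.List.nodup_dedup xs) ((PySem.List.mem_dedup xs x).mpr hx)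
        (fun b _ hbx => by
          show (if p b = true then (((xs ++ [x]).count b : Int)) else 0)
              = (if p b = true then ((xs.count b : Int)) else 0)
          have hxb : ¬ x = b := fun he => hbx he.symm
          rw [pv_count_snoc, if_neg hxb, Nat.add_zero])]
      rw [ih, hcp, pv_count_snoc, if_pos rfl]
      by_cases h : p x
      · rw [if_pos h, if_pos h, if_pos h]
        push_cast
        ring
      · rw [if_neg h, if_neg h, if_neg h]
        ring
    · rw [pv_dedup_snoc_new xs x hx, List.map_append, List.sum_append]
      have h1 : (PySem.List.dedup xs).map
            (fun a => if p a then ((xs ++ [x]).count a : Int) else 0)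
          = (PySem.List.dedup xs).map
            (fun a => if p a then (xs.count a : Int) else 0) := by
        apply List.map_congr_left
        intro b hb
        have hbx : x ≠ b := fun he => hx (he ▸ (PySem.List.mem_dedup xs b).mp hb)
        show (if p b = true then (((xs ++ [x]).count b : Int)) else 0)
            = (if p b = true then ((xs.count b : Int)) else 0)
        rw [pv_count_snoc, if_neg hbx, Nat.add_zero]
      rw [h1, ih, hcp]
      have hc0 : xs.count x = 0 := List.count_eq_zero.mpr hx
      rw [List.map_singleton, List.sum_singleton, pv_count_snoc, if_pos rfl, hc0]
      by_cases h : p x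
      · rw [if_pos h, if_pos h]
        simp
      · rw [if_neg h, if_neg h]

-- splitting an indicator-weighted sum whose weights are pointwise sums
theorem pv_sum_split (ms : List Int) (q : Int → Prop) [DecidablePred q] (u v : Int → Int) :
    (ms.map (fun b => if q b then u b + v b else 0)).sum
      = (ms.map (fun b => if q b then u b else 0)).sum
        + (ms.map (fun b => if q b then v b else 0)).sum := by
  induction ms with
  | nil => simp
  | cons b ms ih =>
    simp only [List.map_cons, List.sum_cons, ih]
    by_cases h : q b
    · simp [h]
      try ring
    · simp [h]
      try ring

theorem pv_c2_delta (F : Int) (_h : 1 ≤ F) :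
    PySem.Int.floordiv ((F + 1) * F) 2 = PySem.Int.floordiv (F * (F - 1)) 2 + F := by
  obtain ⟨k, hk⟩ : Even (F * (F - 1)) := by
    have := Int.even_mul_succ_self (F - 1)
    have he : (F - 1) * (F - 1 + 1) = F * (F - 1) := by ring
    rwa [he] at this
  have h2 : (F + 1) * F = F * (F - 1) + 2 * F := by ring
  rw [h2, PySem.Int.floordiv_eq_ediv_of_pos (by norm_num),
      PySem.Int.floordiv_eq_ediv_of_pos (by norm_num)]
  omega

theorem pv_c2_pos (F : Int) (h : 2 ≤ F) : 1 ≤ PySem.Int.floordiv (F * (F - 1)) 2 := by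
  have h2 : 2 ≤ F * (F - 1) := by nlinarith
  rw [PySem.Int.floordiv_eq_ediv_of_pos (by norm_num)]
  omega

-- appending a brand-new mask x adds one weighted entry (pvF a x, F a) per existing mask a
theorem pv_W_snoc_new (F F' : Int → Int) (ms : List Int) (x : Int) (t : Int)
    (hx : x ∉ ms) (hagree : ∀ a ∈ ms, F' a = F a) (h1 : F' x = 1) :
    pvWsum (pvW F' (ms ++ [x])) t
      = pvWsum (pvW F ms) t + (ms.map (fun a => if pvF a x = t then F a else 0)).sum := by
  induction ms with
  | nil =>
    have hgd : pvGd F' x = [] := by rw [pvGd, h1]; norm_num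
    show pvWsum (pvGd F' x ++ List.map _ [] ++ pvPairsWith (pvGd F') (pvGp F') []) t = _
    simp [hgd, pvW, pvPairsWith, pvWsum]
  | cons a ms ih =>
    have hx2 : x ∉ ms := fun h => hx (List.mem_cons_of_mem _ h)
    have hxa : x ≠ a := fun h => hx (h ▸ List.mem_cons_self)
    have ha : F' a = F a := hagree a (by simp)
    rw [List.cons_append, pv_W_cons F' a (ms ++ [x]) t, pv_W_cons F a ms t,
        ih hx2 (fun b hb => hagree b (List.mem_cons_of_mem _ hb))]
    have hrow : ((ms ++ [x]).map (fun b => if pvF a b = t then F' a * F' b else 0)).sum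
        = (ms.map (fun b => if pvF a b = t then F a * F b else 0)).sum
          + (if pvF a x = t then F a else 0) := by
      rw [List.map_append, List.sum_append]
      congr 1
      · apply congrArg
        apply List.map_congr_left
        intro b hb
        rw [ha, hagree b (by simp [hb])]
      · rw [List.map_singleton, List.sum_singleton, h1, ha, mul_one]
    rw [hrow, ha, List.map_cons, List.sum_cons]
    ring

-- bumping the multiplicity of an existing mask x adds (pvF x b, F b) per mask b (b = x: the diagonal)
theorem pv_W_bump (F F' : Int → Int) (ms : List Int) (x : Int) (t : Int)
    (hnd : ms.Nodup) (hx : x ∈ ms) (hFx : 1 ≤ F x) (hbump : F' x = F x + 1)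
    (hagree : ∀ a ∈ ms, a ≠ x → F' a = F a) :
    pvWsum (pvW F' ms) t
      = pvWsum (pvW F ms) t + (ms.map (fun b => if pvF x b = t then F b else 0)).sum := by
  induction ms with
  | nil => simp at hx
  | cons a ms ih =>
    rw [List.nodup_cons] at hnd
    rw [pv_W_cons F' a ms t, pv_W_cons F a ms t, List.map_cons, List.sum_cons]
    rcases List.mem_cons.mp hx with h1 | h1
    · -- a = x: the diagonal and x's own row change
      subst h1
      have hrec : pvW F' ms = pvW F ms :=
        pv_W_congr F' F ms (fun b hb => hagree b (by simp [hb]) (fun hbx => hnd.1 (hbx ▸ hb)))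
      have hdiag :
          (if 2 ≤ F' x ∧ (pvBits x : Int) = t then PySem.Int.floordiv (F' x * (F' x - 1)) 2 else 0)
            = (if 2 ≤ F x ∧ (pvBits x : Int) = t then PySem.Int.floordiv (F x * (F x - 1)) 2 else 0)
              + (if (pvBits x : Int) = t then F x else 0) := by
        by_cases hb : (pvBits x : Int) = t
        · by_cases h2 : 2 ≤ F x
          · rw [if_pos ⟨by omega, hb⟩, if_pos ⟨h2, hb⟩, if_pos hb, hbump]
            have := pv_c2_delta (F x) (by omega)
            calc PySem.Int.floordiv ((F x + 1) * (F x + 1 - 1)) 2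
                = PySem.Int.floordiv ((F x + 1) * F x) 2 := by ring_nf
              _ = PySem.Int.floordiv (F x * (F x - 1)) 2 + F x := this
          · have hF1 : F x = 1 := by omega
            rw [if_pos ⟨by omega, hb⟩, if_neg (fun hc => h2 hc.1), if_pos hb, hbump, hF1]
            rw [PySem.Int.floordiv_eq_ediv_of_pos (by norm_num)]
            norm_num
        · rw [if_neg (fun hc => hb hc.2), if_neg (fun hc => hb hc.2), if_neg hb, add_zero]
      have hrow : (ms.map (fun b => if pvF x b = t then F' x * F' b else 0)).sum
          = (ms.map (fun b => if pvF x b = t then F x * F b else 0)).sum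
            + (ms.map (fun b => if pvF x b = t then F b else 0)).sum := by
        rw [← pv_sum_split ms (fun b => pvF x b = t) (fun b => F x * F b) (fun b => F b)]
        apply congrArg
        apply List.map_congr_left
        intro b hb
        have hba : F' b = F b := hagree b (by simp [hb]) (fun hbx => hnd.1 (hbx ▸ hb))
        rw [hbump, hba]
        have : (F x + 1) * F b = F x * F b + F b := by ring
        rw [this]
      rw [hrec, hdiag, hrow, pvF_self]
      ring
    · -- x lies further on: a's row changes at b = x, the rest by induction
      have hax : a ≠ x := fun he => hnd.1 (he ▸ h1)
      have ha : F' a = F a := hagree a (by simp) hax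
      have hrow : (ms.map (fun b => if pvF a b = t then F' a * F' b else 0)).sum
          = (ms.map (fun b => if pvF a b = t then F a * F b else 0)).sum
            + (if pvF a x = t then F a else 0) := by
        rw [pv_sum_congr_except ms x
          (fun b => if pvF a b = t then F a * F b else 0)
          (fun b => if pvF a b = t then F' a * F' b else 0)
          hnd.2 h1
          (fun b hb hbx => by
            show (if pvF a b = t then F' a * F' b else 0) = (if pvF a b = t then F a * F b else 0)
            rw [ha, hagree b (by simp [hb]) hbx])]
        show _ + ((if pvF a x = t then F' a * F' x else 0) - (if pvF a x = t then F a * F x else 0)) = _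
        rw [ha, hbump]
        by_cases hc : pvF a x = t
        · rw [if_pos hc, if_pos hc, if_pos hc]
          ring
        · rw [if_neg hc, if_neg hc, if_neg hc]
          ring
      rw [hrow, ha,
          ih hnd.2 h1 (fun b hb hbx => hagree b (by simp [hb]) hbx)]
      rw [pvF_comm x a]
      ring

theorem pv_PV_snoc_count (xs : List Int) (x : Int) (t : Int) :
    ((pvPV (xs ++ [x])).count t : Int)
      = ((pvPV xs).count t : Int) + (xs.countP (fun y => decide (pvF y x = t)) : Int) := by
  induction xs with
  | nil => simp [pvPV, pvPairsWith]
  | cons y xs ih =>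
    have hl : pvPV (y :: xs ++ [x])
        = (xs.map (pvF y) ++ [pvF y x]) ++ pvPV (xs ++ [x]) := by
      show ([] : List Int) ++ (xs ++ [x]).map (pvF y) ++ pvPV (xs ++ [x]) = _
      simp [List.map_append]
    have hr : pvPV (y :: xs) = xs.map (pvF y) ++ pvPV xs := by
      show ([] : List Int) ++ xs.map (pvF y) ++ pvPV xs = _
      simp
    rw [hl, hr]
    rw [List.count_append, List.count_append, List.count_append, List.countP_cons]
    push_cast [ih, List.count_singleton]
    by_cases h : pvF y x = t
    · simp [h]
      try ring
    · simp [h]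
      try ring

-- the weighted sum at each value over B's distinct-mask pairs equals the plain count over A's pair values
theorem pv_core_count (nums : List Int) (t : Int) :
    pvWsum (pvW (pvFreq nums) (PySem.List.dedup nums)) t = ((pvPV nums).count t : Int) := by
  induction nums using List.reverseRecOn with
  | nil => rfl
  | append_singleton xs x ih =>
    have hmask : ∀ (ms : List Int),
        (ms.map (fun b => if pvF x b = t then pvFreq xs b else 0)).sum
          = (ms.map (fun b => if (fun b => decide (pvF x b = t)) b then (xs.count b : Int) else 0)).sum := by
      intro ms
      apply congrArg
      apply List.map_congr_left
      intro b _
      by_cases h : pvF x b = t <;> simp [h, pvFreq]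
    have hcountP : (xs.countP (fun b => decide (pvF x b = t)) : Int)
        = (xs.countP (fun y => decide (pvF y x = t)) : Int) := by
      have : xs.countP (fun b => decide (pvF x b = t)) = xs.countP (fun y => decide (pvF y x = t)) := by
        apply List.countP_congr
        intro b _
        simp [pvF_comm x b]
      rw [this]
    by_cases hx : x ∈ xs
    · rw [pv_dedup_snoc_mem xs x hx]
      rw [pv_W_bump (pvFreq xs) (pvFreq (xs ++ [x])) (PySem.List.dedup xs) x t
        (PySem.List.nodup_dedup xs) ((PySem.List.mem_dedup xs x).mpr hx)
        (by have := List.count_pos_iff.mpr hx; unfold pvFreq; omega)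
        (by unfold pvFreq; rw [pv_count_snoc, if_pos rfl]; push_cast; ring)
        (fun a _ hax => by
          unfold pvFreq
          rw [pv_count_snoc, if_neg (fun he => hax he.symm), Nat.add_zero])]
      rw [ih, hmask, pv_masks_sum xs (fun b => decide (pvF x b = t)), hcountP,
          pv_PV_snoc_count]
    · rw [pv_dedup_snoc_new xs x hx]
      rw [pv_W_snoc_new (pvFreq xs) (pvFreq (xs ++ [x])) (PySem.List.dedup xs) x t
        (fun hm => hx ((PySem.List.mem_dedup xs x).mp hm))
        (fun a ha => by
          have hax : x ≠ a := fun he => hx (he ▸ (PySem.List.mem_dedup xs a).mp ha)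
          unfold pvFreq
          rw [pv_count_snoc, if_neg hax, Nat.add_zero])
        (by unfold pvFreq
            rw [pv_count_snoc, if_pos rfl, List.count_eq_zero.mpr hx]
            simp)]
      rw [ih, pv_PV_snoc_count]
      have hmask2 : ((PySem.List.dedup xs).map (fun a => if pvF a x = t then pvFreq xs a else 0)).sum
          = (xs.countP (fun y => decide (pvF y x = t)) : Int) := by
        rw [show (fun a => if pvF a x = t then pvFreq xs a else 0)
            = (fun a => if (fun a => decide (pvF a x = t)) a then (xs.count a : Int) else 0) from ?_,
          pv_masks_sum xs (fun a => decide (pvF a x = t))]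
        funext a
        by_cases h : pvF a x = t <;> simp [h, pvFreq]
      rw [hmask2]

theorem pv_W_weight_pos (F : Int → Int) (ms : List Int) (hF : ∀ a ∈ ms, 1 ≤ F a) :
    ∀ p ∈ pvW F ms, 1 ≤ p.2 := by
  induction ms with
  | nil => intro p hp; simp [pvW, pvPairsWith] at hp
  | cons a ms ih =>
    intro p hp
    have hFa : 1 ≤ F a := hF a (by simp)
    have hp' : p ∈ pvGd F a ++ ms.map (pvGp F a) ++ pvW F ms := hp
    rcases List.mem_append.mp hp' with h | h
    · rcases List.mem_append.mp h with h1 | h1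
      · by_cases h2 : 2 ≤ F a
        · rw [pvGd, if_pos h2] at h1
          have := List.mem_singleton.mp h1
          subst this
          exact pv_c2_pos (F a) h2
        · rw [pvGd, if_neg h2] at h1
          simp at h1
      · obtain ⟨b, hb, rfl⟩ := List.mem_map.mp h1
        have hFb : 1 ≤ F b := hF b (by simp [hb])
        show 1 ≤ F a * F b
        nlinarith
    · exact ih (fun a' ha' => hF a' (by simp [ha'])) p h

theorem pv_wsum_nonneg (l : List (Int × Int)) (t : Int) (hw : ∀ p ∈ l, 1 ≤ p.2) :
    0 ≤ pvWsum l t := by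
  induction l with
  | nil => simp [pvWsum]
  | cons p l ih =>
    rw [pvWsum_cons]
    have h1 := hw p (by simp)
    have h2 := ih (fun q hq => hw q (by simp [hq]))
    by_cases h : p.1 = t
    · rw [if_pos h]; omega
    · rw [if_neg h]; omega

theorem pv_wsum_pos_iff (l : List (Int × Int)) (t : Int) (hw : ∀ p ∈ l, 1 ≤ p.2) :
    0 < pvWsum l t ↔ t ∈ l.map Prod.fst := by
  induction l with
  | nil => simp [pvWsum]
  | cons p l ih =>
    rw [pvWsum_cons, List.map_cons, List.mem_cons]
    have h1 := hw p (by simp)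
    have h2 := pv_wsum_nonneg l t (fun q hq => hw q (by simp [hq]))
    have ihl := ih (fun q hq => hw q (by simp [hq]))
    by_cases h : p.1 = t
    · rw [if_pos h]
      constructor
      · intro _; left; exact h.symm
      · intro _; omega
    · rw [if_neg h, zero_add, ihl]
      constructor
      · intro hm; right; exact hm
      · intro hm
        rcases hm with hm | hm
        · exact absurd hm.symm h
        · exact hm

theorem pv_maxv_eq_of_mem_iff (l₁ l₂ : List (Int × Int))
    (h : ∀ t, t ∈ l₁.map Prod.fst ↔ t ∈ l₂.map Prod.fst) :
    pvMaxv 0 l₁ = pvMaxv 0 l₂ := by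
  have hle : ∀ (l l' : List (Int × Int)),
      (∀ t, t ∈ l.map Prod.fst → t ∈ l'.map Prod.fst) → pvMaxv 0 l ≤ pvMaxv 0 l' := by
    intro l l' hsub
    rcases pv_maxv_mem l 0 with h0 | hm
    · rw [h0]; exact pv_le_maxv l' 0
    · obtain ⟨p, hp, hpe⟩ := List.mem_map.mp (hsub _ hm)
      rw [← hpe]
      exact pv_maxv_ge l' 0 p hp
  exact le_antisymm (hle l₁ l₂ (fun t => (h t).mp)) (hle l₂ l₁ (fun t => (h t).mpr))

-- ========== bridges to the two ports ==========

theorem pv_cs_struct (topics : List String) :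
    pvCs topics (topics.length : Int) = pvPV (topics.map pvParse) := by
  unfold pvCs pvPV
  rw [← pv_pairsWith_comp pvParse (fun _ => ([] : List Int)) pvF topics,
      ← pv_idx_pairs topics "" (fun _ => ([] : List Int))
        (fun s t' => pvF (pvParse s) (pvParse t'))]
  apply pv_flatMap_congr
  intro i _
  rw [List.nil_append]
  rfl

theorem pv_alt_eq (topics : List String) (hl : ¬ ((topics.length : Int) < 2)) :
    acmTeam_alt topics
      = [((pvW (pvFreq (topics.map pvParse)) (PySem.List.dedup (topics.map pvParse))).foldl
            pvWStep (0, 0)).1,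
         ((pvW (pvFreq (topics.map pvParse)) (PySem.List.dedup (topics.map pvParse))).foldl
            pvWStep (0, 0)).2] := by
  unfold acmTeam_alt
  rw [if_neg hl]
  have hfreq : topics.foldl (fun d t =>
        let v := pvParse t
        d.insert v (d.getD v 0 + 1)) PySem.Dict.empty
      = PySem.Dict.counter (topics.map pvParse) := by
    rw [← PySem.Dict.foldl_insert_getD_add_one_eq_counter, List.foldl_map]
  rw [hfreq]
  dsimp only
  rw [PySem.Dict.keys_counter, ← PySem.List.dedup_eq_ofList]
  simp only [PySem.Dict.getD_counter]
  have hbody : ∀ (st : Int × Int) (i : Int),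
      ((PySem.List.pyRange (i + 1) ((PySem.List.dedup (topics.map pvParse)).length : Int)).foldl
        (fun st j =>
          pvTally st.1 st.2
            ((pvBits (PySem.Int.bor (PySem.List.pyGetD (PySem.List.dedup (topics.map pvParse)) i 0)
                (PySem.List.pyGetD (PySem.List.dedup (topics.map pvParse)) j 0)) : Int))
            (((topics.map pvParse).count
                (PySem.List.pyGetD (PySem.List.dedup (topics.map pvParse)) i 0) : Int)
              * ((topics.map pvParse).count
                  (PySem.List.pyGetD (PySem.List.dedup (topics.map pvParse)) j 0) : Int)))
        (if 2 ≤ ((topics.map pvParse).count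
              (PySem.List.pyGetD (PySem.List.dedup (topics.map pvParse)) i 0) : Int) then
            pvTally st.1 st.2
              ((pvBits (PySem.List.pyGetD (PySem.List.dedup (topics.map pvParse)) i 0) : Int))
              (PySem.Int.floordiv
                (((topics.map pvParse).count
                    (PySem.List.pyGetD (PySem.List.dedup (topics.map pvParse)) i 0) : Int)
                  * (((topics.map pvParse).count
                      (PySem.List.pyGetD (PySem.List.dedup (topics.map pvParse)) i 0) : Int) - 1)) 2)
          else st))
      = ((pvGd (pvFreq (topics.map pvParse))
            (PySem.List.pyGetD (PySem.List.dedup (topics.map pvParse)) i 0)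
          ++ (PySem.List.pyRange (i + 1)
                ((PySem.List.dedup (topics.map pvParse)).length : Int)).map
              (fun j => pvGp (pvFreq (topics.map pvParse))
                (PySem.List.pyGetD (PySem.List.dedup (topics.map pvParse)) i 0)
                (PySem.List.pyGetD (PySem.List.dedup (topics.map pvParse)) j 0))).foldl
          pvWStep st) := by
    intro st i
    rw [List.foldl_append, List.foldl_map]
    have hgd : (pvGd (pvFreq (topics.map pvParse))
          (PySem.List.pyGetD (PySem.List.dedup (topics.map pvParse)) i 0)).foldl pvWStep st
        = (if 2 ≤ ((topics.map pvParse).count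
              (PySem.List.pyGetD (PySem.List.dedup (topics.map pvParse)) i 0) : Int) then
            pvTally st.1 st.2
              ((pvBits (PySem.List.pyGetD (PySem.List.dedup (topics.map pvParse)) i 0) : Int))
              (PySem.Int.floordiv
                (((topics.map pvParse).count
                    (PySem.List.pyGetD (PySem.List.dedup (topics.map pvParse)) i 0) : Int)
                  * (((topics.map pvParse).count
                      (PySem.List.pyGetD (PySem.List.dedup (topics.map pvParse)) i 0) : Int) - 1)) 2)
          else st) := by
      rw [pvGd]
      by_cases h2 : 2 ≤ pvFreq (topics.map pvParse)
          (PySem.List.pyGetD (PySem.List.dedup (topics.map pvParse)) i 0)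
      · rw [if_pos h2, if_pos (by exact h2)]
        rfl
      · rw [if_neg h2, if_neg (by exact h2)]
        rfl
    rw [hgd]
    rfl
  simp only [hbody]
  rw [pv_foldl_nested pvWStep, pv_idx_pairs (PySem.List.dedup (topics.map pvParse)) 0
      (pvGd (pvFreq (topics.map pvParse))) (pvGp (pvFreq (topics.map pvParse)))]
  rfl

-- ===== VERDICT (by name: the statement is the Claim_ definition above) =====
theorem acmTeam_spec : Claim_equal_acmTeam := by
  intro topics _ hpre
  unfold Spec_acmTeam
  by_cases hl : ((topics.length : Int) < 2)
  · -- a single row: no pairs on either side; both return [0, 0]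
    have hlen : topics.length = 1 := by
      have := List.length_pos_iff.mpr hpre.1
      omega
    rw [pv_acmTeam_eq]
    simp only [acmTeam_alt, hlen]
    norm_num
    norm_num [pvCs, show PySem.List.pyRange 0 0 = [] from rfl]
  rw [pv_acmTeam_eq, pv_cs_ext topics hpre.1, pv_alt_eq topics hl]
  obtain ⟨h1, h2, _⟩ :=
    pv_fold_link (pvCs topics (topics.length : Int)) 0 [] 0 (by simp) (by simp)
  rw [h2, h1]
  have hmap : (pvCs topics (topics.length : Int)).foldl pvStepB (0, 0)
      = ((pvCs topics (topics.length : Int)).map (fun c => (c, (1 : Int)))).foldl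
          pvWStep (0, 0) := by
    rw [List.foldl_map]
    simp only [← pvStepB_eq_wstep]
  rw [hmap, pv_cs_struct]
  have hwA : ∀ p ∈ (pvPV (topics.map pvParse)).map (fun c => (c, (1 : Int))), 1 ≤ p.2 := by
    intro p hp
    obtain ⟨c, _, rfl⟩ := List.mem_map.mp hp
    norm_num
  have hFpos : ∀ a ∈ PySem.List.dedup (topics.map pvParse),
      1 ≤ pvFreq (topics.map pvParse) a := by
    intro a ha
    have hm : a ∈ topics.map pvParse := (PySem.List.mem_dedup (topics.map pvParse) a).mp ha
    have := List.count_pos_iff.mpr hm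
    unfold pvFreq
    omega
  have hwB := pv_W_weight_pos (pvFreq (topics.map pvParse))
    (PySem.List.dedup (topics.map pvParse)) hFpos
  have hws : ∀ t, pvWsum ((pvPV (topics.map pvParse)).map (fun c => (c, (1 : Int)))) t
      = pvWsum (pvW (pvFreq (topics.map pvParse))
          (PySem.List.dedup (topics.map pvParse))) t := by
    intro t
    rw [pv_wsum_map_one]
    exact (pv_core_count (topics.map pvParse) t).symm
  have hmem : ∀ t,
      t ∈ ((pvPV (topics.map pvParse)).map (fun c => (c, (1 : Int)))).map Prod.fst
        ↔ t ∈ (pvW (pvFreq (topics.map pvParse))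
            (PySem.List.dedup (topics.map pvParse))).map Prod.fst := by
    intro t
    rw [← pv_wsum_pos_iff _ t hwA, ← pv_wsum_pos_iff _ t hwB, hws t]
  rw [pv_tally_char0, pv_tally_char0, pv_maxv_eq_of_mem_iff _ _ hmem, hws]
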